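-- pv_equiv track=rewrite | github.com/zionia4758/programmers | level2/디펜스 게임.py | solution
-- ===== SOURCE A (Python) =====
-- from queue import PriorityQueue
--
-- def solution(n, k, enemy):
--     answer = 0
--     enenmySum = 0
--     defenceCnt = 0
--     dList = PriorityQueue()
--     for num in enemy:
--         if defenceCnt < k:
--             dList.put(num)
--             answer+=1
--             defenceCnt += 1
--             continue
--         else:
--             minD = dList.get()
--             dList.put(max(minD,num))
--             num = min(minD,num)
--             n -= num
--             if n <0:
--                 break
--             else:
--                 answer+=1
--
--     return answer
-- ===== SOURCE B (Python) =====
-- def solution(n, k, enemy):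
--     # Stateless rescan: round i is survivable iff it is free (i < k) or the
--     # total damage of the first i+1 rounds minus the k largest (defended) ones
--     # fits in n; return the first unsurvivable round index, else all rounds.
--     for i in range(len(enemy)):
--         if i >= k and sum(sorted(enemy[:i + 1])[:i + 1 - k]) > n:
--             return i
--     return len(enemy)
-- ===== Notes on version B (the rewrite author's own statement) =====
-- stated objective: simpler
-- what changed: A runs a greedy loop that carries a priority queue of the k largest enemies seen and a running health budget; B is a stateless scan that, for each round index i, recomputes the cumulative paid damage as the sum of the (i+1-k) smallest values of the sorted prefix and returns the first index where it exceeds n.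
-- outside the precondition, e.g. on solution(5, 0, [1]): A does not finish within the time limit, B returns 1
import Mathlib
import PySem

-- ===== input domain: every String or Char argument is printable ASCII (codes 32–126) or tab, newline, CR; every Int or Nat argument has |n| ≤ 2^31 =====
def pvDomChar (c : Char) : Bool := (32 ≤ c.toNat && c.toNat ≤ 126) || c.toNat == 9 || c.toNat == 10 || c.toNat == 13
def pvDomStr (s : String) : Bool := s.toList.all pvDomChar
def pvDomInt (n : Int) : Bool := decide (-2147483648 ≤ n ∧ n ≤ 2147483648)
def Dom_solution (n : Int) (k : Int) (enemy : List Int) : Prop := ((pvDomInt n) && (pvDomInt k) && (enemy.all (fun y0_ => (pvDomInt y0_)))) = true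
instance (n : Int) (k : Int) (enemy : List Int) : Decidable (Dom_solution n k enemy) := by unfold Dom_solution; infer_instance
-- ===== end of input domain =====

-- B replaces A's heap-carrying greedy loop by a stateless scan that re-derives each
-- round's cumulative paid damage from a sorted prefix (objective: simpler; not faster).

-- ===== PORT A =====
-- A's PriorityQueue is modelled as an ascending sorted list:
-- put = orderedInsert, get = head.  (Python's get() blocks on an empty queue; that
-- state is excluded by Pre_solution, the port returns the current answer there.)
def solution_go (n : Int) (k : Int) (answer : Int) (defenceCnt : Int) (dList : List Int) : List Int → Int
  | [] => answer
  | num :: rest =>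
    if defenceCnt < k then
      solution_go n k (answer + 1) (defenceCnt + 1) (List.orderedInsert (· ≤ ·) num dList) rest
    else
      match dList with
      | [] => answer  -- Python blocks forever here (get() on empty queue); unreachable under Pre_solution
      | minD :: tl =>
        let dList' := List.orderedInsert (· ≤ ·) (max minD num) tl
        let num' := min minD num
        let n' := n - num'
        if n' < 0 then answer
        else solution_go n' k (answer + 1) defenceCnt dList' rest

def solution (n : Int) (k : Int) (enemy : List Int) : Int :=
  solution_go n k 0 0 [] enemy

-- ===== PORT B =====
def solution_alt_go (n : Int) (k : Int) (enemy : List Int) (i : Nat) : Int :=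
  if i < enemy.length then
    if k ≤ (i : Int) ∧
        ((PySem.List.sorted (enemy.take (i + 1)) (fun x => x) false).take ((i + 1) - k.toNat)).sum > n
    then (i : Int)
    else solution_alt_go n k enemy (i + 1)
  else (enemy.length : Int)
termination_by enemy.length - i

def solution_alt (n : Int) (k : Int) (enemy : List Int) : Int :=
  solution_alt_go n k enemy 0

-- ===== PRECONDITION & SPEC =====
-- Pre_ excludes k < 1 with a nonempty enemy list: there A never returns a value —
-- it calls PriorityQueue.get() on an empty queue, which blocks forever.
def Pre_solution (n : Int) (k : Int) (enemy : List Int) : Prop := enemy = [] ∨ 1 ≤ k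
instance (n : Int) (k : Int) (enemy : List Int) : Decidable (Pre_solution n k enemy) := by unfold Pre_solution; infer_instance
def pvWitness_solution : Int × Int × List Int := (7, 2, [4, 2, 4, 5, 3, 3, 1])

def Spec_solution (n : Int) (k : Int) (enemy : List Int) (out : Int) : Prop := out = solution_alt n k enemy
instance (n : Int) (k : Int) (enemy : List Int) (out : Int) : Decidable (Spec_solution n k enemy out) := by unfold Spec_solution; infer_instance

-- ===== CLAIM (what is proved, stated in full; the proofs are below) =====
def Claim_equal_solution : Prop := ∀ (n : Int) (k : Int) (enemy : List Int), Dom_solution n k enemy → Pre_solution n k enemy → Spec_solution n k enemy (solution n k enemy)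

-- ===== LEMMAS AND PROOFS =====

-- unfolding equations of A's loop
lemma go_nil (n k a d : Int) (dl : List Int) : solution_go n k a d dl [] = a := rfl

lemma go_free (n k a d : Int) (dl : List Int) (num : Int) (rest : List Int) (h : d < k) :
    solution_go n k a d dl (num :: rest)
      = solution_go n k (a + 1) (d + 1) (List.orderedInsert (· ≤ ·) num dl) rest := by
  conv_lhs => rw [solution_go.eq_def]
  simp only [if_pos h]

lemma go_paid (n k a d : Int) (minD : Int) (tl : List Int) (num : Int) (rest : List Int) (h : ¬ d < k) :
    solution_go n k a d (minD :: tl) (num :: rest)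
      = if n - min minD num < 0 then a
        else solution_go (n - min minD num) k (a + 1) d (List.orderedInsert (· ≤ ·) (max minD num) tl) rest := by
  conv_lhs => rw [solution_go.eq_def]
  simp only [if_neg h]

-- abbreviation used only in the proofs
def sortA (p : List Int) : List Int := PySem.List.sorted p (fun x => x) false

lemma sortA_sorted (p : List Int) : (sortA p).Pairwise (· ≤ ·) := by
  simpa using PySem.List.sorted_pairwise (xs := p) (key := fun x => x)

lemma sortA_length (p : List Int) : (sortA p).length = p.length := by
  simpa [sortA] using PySem.List.length_sorted (xs := p) (key := fun x => x) (reverse := false)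

lemma sortA_append (p : List Int) (x : Int) :
    sortA (p ++ [x]) = List.orderedInsert (· ≤ ·) x (sortA p) := by
  apply PySem.List.sorted_id_eq_of_perm_of_pairwise
  · exact ((List.perm_orderedInsert _ _ _).trans
      ((PySem.List.sorted_perm (xs := p) (key := fun x => x) (rev := false)).cons x)).trans
      (List.perm_append_singleton x p).symm
  · exact List.Pairwise.orderedInsert _ _ (sortA_sorted p)

lemma oi_front (m : Int) (l : List Int) (h : ∀ a ∈ l, m ≤ a) :
    List.orderedInsert (· ≤ ·) m l = m :: l := by
  cases l with
  | nil => rfl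
  | cons a l' => exact List.orderedInsert_cons_of_le _ _ (h a (List.mem_cons_self))

lemma step_drop (s : List Int) (j : Nat) (x : Int)
    (hs : s.Pairwise (· ≤ ·)) (hj : j < s.length) :
    List.drop (j + 1) (List.orderedInsert (· ≤ ·) x s)
      = List.orderedInsert (· ≤ ·) (max s[j] x) (List.drop (j + 1) s) := by
  induction s generalizing j with
  | nil => simp at hj
  | cons y t ih =>
    rcases List.pairwise_cons.mp hs with ⟨hy, ht⟩
    by_cases hxy : x ≤ y
    · rw [List.orderedInsert_cons_of_le _ _ hxy]
      have hxj : x ≤ (y :: t)[j] := by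
        cases j with
        | zero => simpa using hxy
        | succ jj => exact le_trans hxy (hy _ (by simpa using List.getElem_mem (by simpa using hj)))
      rw [max_eq_left hxj]
      have hall : ∀ a ∈ List.drop (j + 1) (y :: t), (y :: t)[j] ≤ a := by
        intro a ha
        have hpd : (List.drop j (y :: t)).Pairwise (· ≤ ·) := hs.drop
        rw [List.drop_eq_getElem_cons hj] at hpd
        exact (List.pairwise_cons.mp hpd).1 a ha
      rw [oi_front _ _ hall, List.drop_succ_cons, ← List.drop_eq_getElem_cons hj]
    · rw [List.orderedInsert_of_not_le _ _ hxy]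
      cases j with
      | zero =>
        simp [max_eq_right (le_of_not_ge hxy)]
      | succ jj =>
        have hjj : jj < t.length := by simpa using hj
        simpa using ih jj ht hjj

lemma step_sum (s : List Int) (j : Nat) (x : Int)
    (hs : s.Pairwise (· ≤ ·)) (hj : j < s.length) :
    (List.take (j + 1) (List.orderedInsert (· ≤ ·) x s)).sum
      = (List.take j s).sum + min s[j] x := by
  induction s generalizing j with
  | nil => simp at hj
  | cons y t ih =>
    rcases List.pairwise_cons.mp hs with ⟨hy, ht⟩
    by_cases hxy : x ≤ y
    · rw [List.orderedInsert_cons_of_le _ _ hxy]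
      have hxj : x ≤ (y :: t)[j] := by
        cases j with
        | zero => simpa using hxy
        | succ jj => exact le_trans hxy (hy _ (by simpa using List.getElem_mem (by simpa using hj)))
      rw [min_eq_right hxj]
      simp [List.sum_cons]
      omega
    · rw [List.orderedInsert_of_not_le _ _ hxy]
      cases j with
      | zero =>
        simp [min_eq_left (le_of_not_ge hxy)]
      | succ jj =>
        have hjj : jj < t.length := by simpa using hj
        have := ih jj ht hjj
        simp only [List.take_succ_cons, List.sum_cons, this]
        simp
        omega

-- the invariant linking A's loop state after a prefix p to B's scan at index p.length
lemma main_inv (rest : List Int) : ∀ (p : List Int) (n0 k : Int), 1 ≤ k →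
    solution_go (n0 - (List.take (p.length - k.toNat) (sortA p)).sum) k
        (p.length : Int) (min (p.length : Int) k)
        (List.drop (p.length - k.toNat) (sortA p)) rest
      = solution_alt_go n0 k (p ++ rest) p.length := by
  induction rest with
  | nil =>
    intro p n0 k hk
    rw [solution_alt_go]
    simp [go_nil]
  | cons x rest ih =>
    intro p n0 k hk
    have hlen : p.length < (p ++ x :: rest).length := by simp
    have htake : (p ++ x :: rest).take (p.length + 1) = p ++ [x] := by
      have h : p ++ x :: rest = (p ++ [x]) ++ rest := by simp
      rw [h, List.take_left' (by simp)]
    have happ : p ++ x :: rest = (p ++ [x]) ++ rest := by simp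
    rw [solution_alt_go, if_pos hlen, htake]
    by_cases hpk : (p.length : Int) < k
    · -- free phase
      have h0 : p.length - k.toNat = 0 := by omega
      have h0' : (p ++ [x]).length - k.toNat = 0 := by simp; omega
      have hcond : ¬ (k ≤ (p.length : Int) ∧
          ((PySem.List.sorted (p ++ [x]) (fun x => x) false).take ((p.length + 1) - k.toNat)).sum > n0) := by
        intro h; exact absurd h.1 (not_le.mpr hpk)
      rw [if_neg hcond]
      have hmin : min (p.length : Int) k = (p.length : Int) := min_eq_left (le_of_lt hpk)
      rw [hmin, h0, List.drop_zero, go_free _ _ _ _ _ _ _ hpk]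
      have hB := ih (p ++ [x]) n0 k hk
      rw [h0', sortA_append] at hB
      simp only [List.drop_zero, List.take_zero, List.sum_nil, List.length_append,
        List.length_cons, List.length_nil, List.append_assoc, List.cons_append,
        List.nil_append, Nat.cast_add, Nat.cast_one, Nat.cast_zero, zero_add, sub_zero] at hB ⊢
      rw [min_eq_left (by omega : (↑p.length + 1 : Int) ≤ k)] at hB
      exact hB
    · -- paid phase: k ≤ p.length
      have hpk' : k ≤ (p.length : Int) := not_lt.mp hpk
      have hkn : k.toNat ≤ p.length := by omega
      set s := sortA p with hsdef
      set j := p.length - k.toNat with hjdef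
      have hj : j < s.length := by rw [hsdef, sortA_length]; omega
      have hdropeq : List.drop j s = s[j] :: List.drop (j + 1) s := List.drop_eq_getElem_cons hj
      have hmin : min (p.length : Int) k = k := min_eq_right hpk'
      have hsort : s.Pairwise (· ≤ ·) := sortA_sorted p
      have hsum := step_sum s j x hsort hj
      have hdrop := step_drop s j x hsort hj
      have hj1 : (p ++ [x]).length - k.toNat = j + 1 := by simp; omega
      have hcostnew : ((PySem.List.sorted (p ++ [x]) (fun x => x) false).take ((p.length + 1) - k.toNat)).sum
          = (List.take j s).sum + min s[j] x := by
        have hsa : sortA (p ++ [x]) = List.orderedInsert (· ≤ ·) x s := by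
          rw [sortA_append, hsdef]
        have h1 : (p.length + 1) - k.toNat = j + 1 := by omega
        rw [h1, show PySem.List.sorted (p ++ [x]) (fun x => x) false = sortA (p ++ [x]) from rfl,
          hsa, hsum]
      rw [hmin, hdropeq, go_paid _ _ _ _ _ _ _ _ (lt_irrefl k)]
      by_cases hbreak : n0 - (List.take j s).sum - min s[j] x < 0
      · have hcond : k ≤ (p.length : Int) ∧
            ((PySem.List.sorted (p ++ [x]) (fun x => x) false).take ((p.length + 1) - k.toNat)).sum > n0 := by
          refine ⟨hpk', ?_⟩
          rw [hcostnew]; omega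
        rw [if_pos hcond, if_pos hbreak]
      · have hcond : ¬ (k ≤ (p.length : Int) ∧
            ((PySem.List.sorted (p ++ [x]) (fun x => x) false).take ((p.length + 1) - k.toNat)).sum > n0) := by
          rintro ⟨-, hgt⟩
          rw [hcostnew] at hgt; omega
        rw [if_neg hcond, if_neg hbreak]
        have hB := ih (p ++ [x]) n0 k hk
        rw [hj1,
          show sortA (p ++ [x]) = List.orderedInsert (· ≤ ·) x s from by rw [sortA_append, hsdef],
          hsum, hdrop] at hB
        simp only [List.length_append, List.length_cons, List.length_nil, List.append_assoc,
          List.cons_append, List.nil_append, Nat.cast_add, Nat.cast_one, Nat.cast_zero, zero_add] at hB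
        rw [min_eq_right (by omega : k ≤ (↑p.length + 1 : Int))] at hB
        rw [show n0 - ((List.take j s).sum + min s[j] x)
              = n0 - (List.take j s).sum - min s[j] x from by ring] at hB
        exact hB

-- ===== VERDICT (by name: the statement is the Claim_ definition above) =====
theorem solution_spec : Claim_equal_solution := by
  intro n k enemy _ hpre
  unfold Spec_solution solution solution_alt
  rcases hpre with rfl | hk
  · rw [go_nil, solution_alt_go]
    simp
  · have h := main_inv enemy [] n k hk
    have h0 : PySem.List.sorted ([] : List Int) (fun x => x) false = [] := rfl
    simpa [sortA, h0, min_eq_left (by omega : (0 : Int) ≤ k)] using h
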